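-- pv_equiv track=rewrite | github.com/hyama1569/siera | augmentation/util/extract.py | extract_d_spans
-- ===== SOURCE A (Python) =====
-- def extract_d_spans(edits):
--     d_spans = []
--     flag = False
--     seen = [0 for i in range(len(edits))]
--     for i in range(len(edits)):
--         if seen[i] != 1:
--             seen[i] = 1
--             if edits[i] != 'KEEP' and edits[i] != 'DEL':
--                 flag = True
--             elif edits[i] == 'KEEP':
--                 flag = False
--             else:
--                 if flag == True:
--                     continue
--                 else:
--                     start = i
--                     j = i + 1
--                     while j < len(edits):
--                         if edits[j] == 'DEL':
--                             seen[j] = 1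
--                             j += 1
--                         elif edits[j] == 'KEEP':
--                             break
--                         else:
--                             flag = True
--                             break
--                     end = j - 1
--                     if end - start >= 0:
--                         d_spans.append((start, end))
--     return d_spans
-- ===== SOURCE B (Python) =====
-- def extract_d_spans(edits):
--     # Consume one maximal run of equal edits per iteration; no 'seen' array.
--     d_spans = []
--     flag = False
--     i = 0
--     while i < len(edits):
--         tok = edits[i]
--         n = 1
--         while i + n < len(edits) and edits[i + n] == tok:
--             n += 1
--         if tok == 'DEL':
--             if not flag:
--                 d_spans.append((i, i + n - 1))
--         else:
--             flag = tok != 'KEEP'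
--         i += n
--     return d_spans
-- ===== Notes on version B (the rewrite author's own statement) =====
-- stated objective: simpler
-- what changed: B replaces A's seen-array bookkeeping with nested index/while loops by a direct recursion that consumes one maximal run of equal edit tokens per step, emitting a span for each DEL run reached with the flag clear.
import Mathlib
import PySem

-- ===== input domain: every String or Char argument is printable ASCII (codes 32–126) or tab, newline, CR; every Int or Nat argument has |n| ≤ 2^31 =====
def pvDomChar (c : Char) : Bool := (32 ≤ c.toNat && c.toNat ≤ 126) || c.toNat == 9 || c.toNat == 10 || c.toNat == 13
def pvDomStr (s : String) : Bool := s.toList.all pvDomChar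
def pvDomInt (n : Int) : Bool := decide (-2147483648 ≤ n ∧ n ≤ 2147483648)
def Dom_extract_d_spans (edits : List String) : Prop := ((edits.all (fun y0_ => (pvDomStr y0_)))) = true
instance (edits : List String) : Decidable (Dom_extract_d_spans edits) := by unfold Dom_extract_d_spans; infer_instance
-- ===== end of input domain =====

-- B replaces A's seen-array bookkeeping and nested while by a recursion that consumes one maximal
-- run of equal edits per step (objective: simpler).

-- ===== PORT A =====
-- inner `while j < len(edits): ...` of A; state (j, seen, flag), returns them at exit
def extract_d_spans_while (edits : List String) (j : Nat) (seen : List Nat) (flag : Bool) :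
    Nat × List Nat × Bool :=
  if j < edits.length then
    let e := edits.getD j ""
    if e = "DEL" then extract_d_spans_while edits (j + 1) (seen.set j 1) flag
    else if e = "KEEP" then (j, seen, flag)
    else (j, seen, true)
  else (j, seen, flag)
termination_by edits.length - j

-- outer `for i in range(len(edits))` of A; state (seen, flag, d_spans)
def extract_d_spans_loop (edits : List String) (i : Nat) (seen : List Nat) (flag : Bool)
    (d_spans : List (Int × Int)) : List (Int × Int) :=
  if i < edits.length then
    if seen.getD i 0 ≠ 1 then
      let seen := seen.set i 1
      let e := edits.getD i ""
      if e ≠ "KEEP" ∧ e ≠ "DEL" then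
        extract_d_spans_loop edits (i + 1) seen true d_spans
      else if e = "KEEP" then
        extract_d_spans_loop edits (i + 1) seen false d_spans
      else
        if flag = true then
          extract_d_spans_loop edits (i + 1) seen flag d_spans
        else
          let w := extract_d_spans_while edits (i + 1) seen flag
          let jEnd : Int := (w.1 : Int) - 1
          if jEnd - (i : Int) ≥ 0 then
            extract_d_spans_loop edits (i + 1) w.2.1 w.2.2 (d_spans ++ [((i : Int), jEnd)])
          else
            extract_d_spans_loop edits (i + 1) w.2.1 w.2.2 d_spans
    else
      extract_d_spans_loop edits (i + 1) seen flag d_spans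
  else d_spans
termination_by edits.length - i

def extract_d_spans (edits : List String) : List (Int × Int) :=
  extract_d_spans_loop edits 0 (List.replicate edits.length 0) false []

-- ===== PORT B =====
-- B's inner `while i + n < len(edits) and edits[i + n] == tok: n += 1`
def extract_d_spans_run (edits : List String) (tok : String) (i : Nat) (n : Nat) : Nat :=
  if i + n < edits.length ∧ edits.getD (i + n) "" = tok then
    extract_d_spans_run edits tok i (n + 1)
  else n
termination_by edits.length - (i + n)

-- needed for termination of the outer loop: the run length is at least its start value
lemma pv_run_ge (edits : List String) (tok : String) (i : Nat) :
    ∀ n, n ≤ extract_d_spans_run edits tok i n := by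
  intro n
  induction n using extract_d_spans_run.induct (edits := edits) (tok := tok) (i := i) with
  | case1 n hc ih =>
    rw [extract_d_spans_run, if_pos hc]
    omega
  | case2 n hc =>
    rw [extract_d_spans_run, if_neg hc]

-- B's outer `while i < len(edits)` loop; state (i, flag, d_spans)
def extract_d_spans_iter (edits : List String) (i : Nat) (flag : Bool)
    (d_spans : List (Int × Int)) : List (Int × Int) :=
  if h : i < edits.length then
    let tok := edits.getD i ""
    let n := extract_d_spans_run edits tok i 1
    if tok = "DEL" then
      if flag then extract_d_spans_iter edits (i + n) flag d_spans
      else extract_d_spans_iter edits (i + n) flag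
        (d_spans ++ [((i : Int), (i : Int) + (n : Int) - 1)])
    else extract_d_spans_iter edits (i + n) (tok ≠ "KEEP") d_spans
  else d_spans
termination_by edits.length - i
decreasing_by all_goals
  (have := pv_run_ge edits (edits.getD i "") i 1; omega)

def extract_d_spans_alt (edits : List String) : List (Int × Int) :=
  extract_d_spans_iter edits 0 false []

-- ===== PRECONDITION & SPEC =====
def Spec_extract_d_spans (edits : List String) (out : List (Int × Int)) : Prop := out = extract_d_spans_alt edits
instance (edits : List String) (out : List (Int × Int)) : Decidable (Spec_extract_d_spans edits out) := by unfold Spec_extract_d_spans; infer_instance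

-- ===== CLAIM (what is proved, stated in full; the proofs are below) =====
def Claim_equal_extract_d_spans : Prop := ∀ (edits : List String), Dom_extract_d_spans edits → Spec_extract_d_spans edits (extract_d_spans edits)

-- ===== LEMMAS AND PROOFS =====

-- proof-layer bridge: both loops compute this run-consuming recursion over the list
def extract_d_spans_go (rest : List String) (i : Nat) (flag : Bool) : List (Int × Int) :=
  match rest with
  | [] => []
  | tok :: xs =>
    -- `n` counts the run: 1 + length of the equal prefix of xs (B's while loop)
    let n := 1 + (xs.takeWhile (fun y => y = tok)).length
    let tail := xs.drop (n - 1)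
    if tok = "DEL" then
      if flag then extract_d_spans_go tail (i + n) flag
      else ((i : Int), (i : Int) + (n : Int) - 1) :: extract_d_spans_go tail (i + n) flag
    else extract_d_spans_go tail (i + n) (tok ≠ "KEEP")
termination_by rest.length
decreasing_by all_goals (simp only [List.length_cons, List.length_drop]; omega)



lemma pv_getD_set (l : List Nat) (j k v : Nat) :
    (l.set j v).getD k 0 = if k = j ∧ j < l.length then v else l.getD k 0 := by
  simp only [List.getD_eq_getElem?_getD, List.getElem?_set]
  split_ifs with h1 h2 h3 <;> simp_all

lemma pv_drop_cons (l : List String) (i : Nat) (h : i < l.length) :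
    l.drop i = l.getD i "" :: l.drop (i + 1) := by
  rw [List.getD_eq_getElem l "" h, List.drop_eq_getElem_cons h]

-- the first element after the maximal p-prefix does not satisfy p
lemma pv_head_after_takeWhile (p : String → Bool) :
    ∀ (xs : List String) (s : String),
      (xs.drop ((xs.takeWhile p).length)).head? = some s → p s = false := by
  intro xs
  induction xs with
  | nil => intro s h; simp at h
  | cons x xs ih =>
    intro s h
    by_cases hp : p x
    · rw [List.takeWhile_cons_of_pos hp] at h
      simpa using ih s (by simpa using h)
    · rw [List.takeWhile_cons_of_neg hp] at h
      simp at h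
      subst h; simpa using hp

lemma pv_go_nil (i : Nat) (b : Bool) : extract_d_spans_go [] i b = [] := by
  rw [extract_d_spans_go]

-- go ignores its flag when the list does not start with "DEL"
lemma pv_go_flag_indep (l : List String) (i : Nat) (b b' : Bool)
    (h : ∀ s, l.head? = some s → s ≠ "DEL") :
    extract_d_spans_go l i b = extract_d_spans_go l i b' := by
  cases l with
  | nil => rw [pv_go_nil, pv_go_nil]
  | cons tok xs =>
    have htok : tok ≠ "DEL" := h tok rfl
    rw [extract_d_spans_go]
    conv_rhs => rw [extract_d_spans_go]
    simp only [if_neg htok]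

-- consuming one non-DEL element of a run
lemma pv_go_step_nonDEL (tok : String) (xs : List String) (i : Nat) (flag : Bool)
    (h : tok ≠ "DEL") :
    extract_d_spans_go (tok :: xs) i flag
      = extract_d_spans_go xs (i + 1) (decide (tok ≠ "KEEP")) := by
  cases xs with
  | nil =>
    rw [pv_go_nil, extract_d_spans_go]
    simp [h, pv_go_nil]
  | cons y ys =>
    by_cases hy : y = tok
    · subst hy
      rw [extract_d_spans_go]
      simp only [if_neg h]
      conv_rhs => rw [extract_d_spans_go]
      simp only [if_neg h]
      rw [List.takeWhile_cons_of_pos (by simp)]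
      simp only [List.length_cons]
      have h1 : 1 + ((List.takeWhile (fun y_1 => decide (y_1 = y)) ys).length + 1) - 1
          = (List.takeWhile (fun y_1 => decide (y_1 = y)) ys).length + 1 := by omega
      have h2 : 1 + (List.takeWhile (fun y_1 => decide (y_1 = y)) ys).length - 1
          = (List.takeWhile (fun y_1 => decide (y_1 = y)) ys).length := by omega
      rw [h1, h2]
      simp only [List.drop_succ_cons]
      congr 1
      omega
    · rw [extract_d_spans_go]
      simp only [if_neg h]
      rw [List.takeWhile_cons_of_neg (by simpa using hy)]
      simp

-- consuming one DEL element while flag is set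
lemma pv_go_step_DEL_true (xs : List String) (i : Nat) :
    extract_d_spans_go ("DEL" :: xs) i true = extract_d_spans_go xs (i + 1) true := by
  cases xs with
  | nil =>
    rw [pv_go_nil, extract_d_spans_go]
    simp [pv_go_nil]
  | cons y ys =>
    by_cases hy : y = "DEL"
    · subst hy
      rw [extract_d_spans_go]
      conv_rhs => rw [extract_d_spans_go]
      rw [List.takeWhile_cons_of_pos (by simp)]
      simp only [List.length_cons]
      have h1 : 1 + ((List.takeWhile (fun y => decide (y = "DEL")) ys).length + 1) - 1
          = (List.takeWhile (fun y => decide (y = "DEL")) ys).length + 1 := by omega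
      have h2 : 1 + (List.takeWhile (fun y => decide (y = "DEL")) ys).length - 1
          = (List.takeWhile (fun y => decide (y = "DEL")) ys).length := by omega
      rw [h1, h2]
      simp only [List.drop_succ_cons]
      have h3 : i + (1 + ((List.takeWhile (fun y => decide (y = "DEL")) ys).length + 1))
          = i + 1 + (1 + (List.takeWhile (fun y => decide (y = "DEL")) ys).length) := by omega
      rw [h3]
      simp
    · rw [extract_d_spans_go]
      rw [List.takeWhile_cons_of_neg (by simpa using hy)]
      simp

-- unfolding go on a DEL-run with flag clear: emit the span of the whole run
lemma pv_go_DEL_false (xs : List String) (i : Nat) :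
    extract_d_spans_go ("DEL" :: xs) i false
      = ((i : Int), (i : Int) + ((xs.takeWhile (fun y => y = "DEL")).length : Int)) ::
        extract_d_spans_go (xs.drop ((xs.takeWhile (fun y => y = "DEL")).length))
          (i + 1 + (xs.takeWhile (fun y => y = "DEL")).length) false := by
  rw [extract_d_spans_go]
  have h2 : 1 + (xs.takeWhile (fun y => decide (y = "DEL"))).length - 1
      = (xs.takeWhile (fun y => decide (y = "DEL"))).length := by omega
  have h3 : i + (1 + (xs.takeWhile (fun y => decide (y = "DEL"))).length)
      = i + 1 + (xs.takeWhile (fun y => decide (y = "DEL"))).length := by omega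
  rw [h2, h3]
  simp only [Bool.false_eq_true, if_false]
  rw [if_pos trivial]
  congr 2
  push_cast
  ring

-- characterization of A's inner while loop: it advances past the maximal DEL-run starting at j,
-- marks exactly those positions seen, and sets flag iff the stopping element is neither end nor KEEP
lemma pv_while_spec (edits : List String) (j : Nat) (seen : List Nat) (flag : Bool)
    (hlen : seen.length = edits.length) :
    (extract_d_spans_while edits j seen flag).1
        = j + ((edits.drop j).takeWhile (fun s => s = "DEL")).length
    ∧ (extract_d_spans_while edits j seen flag).2.1.length = seen.length
    ∧ (∀ k, (extract_d_spans_while edits j seen flag).2.1.getD k 0 =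
        if j ≤ k ∧ k < j + ((edits.drop j).takeWhile (fun s => s = "DEL")).length then 1
        else seen.getD k 0)
    ∧ (extract_d_spans_while edits j seen flag).2.2 =
        (match (edits.drop (j + ((edits.drop j).takeWhile (fun s => s = "DEL")).length)).head? with
         | none => flag
         | some s => if s = "KEEP" then flag else true) := by
  revert hlen
  induction j, seen using extract_d_spans_while.induct (edits := edits) with
  | case1 j seen hj e he ih =>
    intro hlen
    have hjs : j < seen.length := by omega
    have hdrop : edits.drop j = "DEL" :: edits.drop (j + 1) := by
      rw [pv_drop_cons edits j hj, show edits.getD j "" = "DEL" from he]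
    have ih' := ih (by simpa using hlen)
    rw [extract_d_spans_while, if_pos hj, if_pos he]
    rw [hdrop, List.takeWhile_cons_of_pos (by simp)]
    simp only [List.length_cons]
    obtain ⟨c1, c2, c3, c4⟩ := ih'
    refine ⟨by omega, by simpa using c2, ?_, ?_⟩
    · intro k
      rw [c3 k, pv_getD_set]
      split_ifs <;> first | rfl | omega
    · rw [c4]
      have : j + 1 + ((edits.drop (j + 1)).takeWhile (fun s => s = "DEL")).length
          = j + (((edits.drop (j + 1)).takeWhile (fun s => s = "DEL")).length + 1) := by omega
      rw [this]
  | case2 j seen hj e hne he =>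
    intro hlen
    have hdrop : edits.drop j = "KEEP" :: edits.drop (j + 1) := by
      rw [pv_drop_cons edits j hj, show edits.getD j "" = "KEEP" from he]
    rw [extract_d_spans_while, if_pos hj, if_neg hne, if_pos he]
    rw [hdrop, List.takeWhile_cons_of_neg (by simp)]
    refine ⟨by simp, rfl, ?_, ?_⟩
    · intro k; simp
    · simp only [List.length_nil, Nat.add_zero]
      rw [hdrop]
      simp
  | case3 j seen hj e hne hnk =>
    intro hlen
    have hdrop : edits.drop j = edits.getD j "" :: edits.drop (j + 1) :=
      pv_drop_cons edits j hj
    rw [extract_d_spans_while, if_pos hj, if_neg hne, if_neg hnk]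
    rw [hdrop, List.takeWhile_cons_of_neg (by simpa using hne)]
    refine ⟨by simp, rfl, ?_, ?_⟩
    · intro k; simp
    · simp only [List.length_nil, Nat.add_zero]
      rw [hdrop]
      simp
      left
      simpa [List.getD_eq_getElem?_getD] using hnk
  | case4 j seen hj =>
    intro hlen
    have hdrop : edits.drop j = [] := List.drop_eq_nil_of_le (by omega)
    rw [extract_d_spans_while, if_neg hj]
    rw [hdrop]
    refine ⟨by simp, rfl, ?_, ?_⟩
    · intro k; simp
    · simp only [List.takeWhile_nil, List.length_nil, Nat.add_zero]
      rw [hdrop]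
      rfl

lemma pv_getD_replicate (n k : Nat) : (List.replicate n (0 : Nat)).getD k 0 = 0 := by
  simp [List.getD_eq_getElem?_getD, List.getElem?_replicate]
  split <;> simp

-- A's outer loop, related to B's run-consuming recursion.  `s` is the number of
-- already-seen positions directly ahead of `i` (left behind by the inner while loop).
lemma pv_loop_spec (edits : List String) :
    ∀ (n i s : Nat) (seen : List Nat) (flag : Bool) (acc : List (Int × Int)),
      edits.length - i ≤ n →
      seen.length = edits.length →
      (∀ k, i ≤ k → k < i + s → seen.getD k 0 = 1) →
      (∀ k, i + s ≤ k → k < edits.length → seen.getD k 0 ≠ 1) →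
      extract_d_spans_loop edits i seen flag acc
        = acc ++ extract_d_spans_go (edits.drop (i + s)) (i + s) flag := by
  intro n
  induction n with
  | zero =>
    intro i s seen flag acc hn hlen h1 h0
    have hi : ¬ i < edits.length := by omega
    rw [extract_d_spans_loop, if_neg hi]
    rw [List.drop_eq_nil_of_le (by omega : edits.length ≤ i + s), pv_go_nil, List.append_nil]
  | succ n ih =>
    intro i s seen flag acc hn hlen h1 h0
    by_cases hi : i < edits.length
    · rw [extract_d_spans_loop, if_pos hi]
      cases s with
      | succ s' =>
        have hseen : seen.getD i 0 = 1 := h1 i (le_refl _) (by omega)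
        rw [if_neg (by simp [List.getD_eq_getElem?_getD] at hseen; simp [hseen])]
        have hrec := ih (i + 1) s' seen flag acc (by omega) hlen
          (fun k hk1 hk2 => h1 k (by omega) (by omega))
          (fun k hk1 hk2 => h0 k (by omega) hk2)
        rw [hrec]
        have : i + 1 + s' = i + (s' + 1) := by omega
        rw [this]
      | zero =>
        have hseen : seen.getD i 0 ≠ 1 := h0 i (by omega) hi
        rw [if_pos hseen]
        have hdrop : edits.drop i = edits.getD i "" :: edits.drop (i + 1) :=
          pv_drop_cons edits i hi
        by_cases he1 : edits.getD i "" ≠ "KEEP" ∧ edits.getD i "" ≠ "DEL"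
        · rw [if_pos he1]
          have hrec := ih (i + 1) 0 (seen.set i 1) true acc (by omega) (by simp [hlen])
            (fun k hk1 hk2 => by omega)
            (fun k hk1 hk2 => by
              rw [pv_getD_set]
              rw [if_neg (by omega)]
              exact h0 k (by omega) hk2)
          rw [hrec]
          simp only [Nat.add_zero]
          rw [hdrop, pv_go_step_nonDEL _ _ _ _ he1.2]
          rw [decide_eq_true (by exact he1.1)]
        · rw [if_neg he1]
          by_cases he2 : edits.getD i "" = "KEEP"
          · rw [if_pos he2]
            have hrec := ih (i + 1) 0 (seen.set i 1) false acc (by omega) (by simp [hlen])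
              (fun k hk1 hk2 => by omega)
              (fun k hk1 hk2 => by
                rw [pv_getD_set]
                rw [if_neg (by omega)]
                exact h0 k (by omega) hk2)
            rw [hrec]
            simp only [Nat.add_zero]
            rw [hdrop, pv_go_step_nonDEL _ _ _ _ (by rw [he2]; decide)]
            rw [show decide (edits.getD i "" ≠ "KEEP") = false from by rw [he2]; decide]
          · rw [if_neg he2]
            have heD : edits.getD i "" = "DEL" := by
              by_contra hD
              exact he1 ⟨he2, hD⟩
            by_cases hf : flag = true
            · rw [if_pos hf]
              have hrec := ih (i + 1) 0 (seen.set i 1) flag acc (by omega) (by simp [hlen])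
                (fun k hk1 hk2 => by omega)
                (fun k hk1 hk2 => by
                  rw [pv_getD_set]
                  rw [if_neg (by omega)]
                  exact h0 k (by omega) hk2)
              rw [hrec]
              simp only [Nat.add_zero]
              rw [hdrop, heD, hf, pv_go_step_DEL_true]
            · rw [if_neg hf]
              have hflag : flag = false := by simpa using hf
              subst hflag
              obtain ⟨c1, c2, c3, c4⟩ :=
                pv_while_spec edits (i + 1) (seen.set i 1) false (by simp [hlen])
              rw [if_pos (by rw [c1]; push_cast; omega)]
              have hrec := ih (i + 1)
                ((edits.drop (i + 1)).takeWhile (fun s => s = "DEL")).length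
                (extract_d_spans_while edits (i + 1) (seen.set i 1) false).2.1
                (extract_d_spans_while edits (i + 1) (seen.set i 1) false).2.2
                (acc ++ [((i : Int),
                  ((extract_d_spans_while edits (i + 1) (seen.set i 1) false).1 : Int) - 1)])
                (by omega)
                (by rw [c2]; simp [hlen])
                (fun k hk1 hk2 => by rw [c3 k, if_pos ⟨hk1, hk2⟩])
                (fun k hk1 hk2 => by
                  rw [c3 k, if_neg (by omega), pv_getD_set, if_neg (by omega)]
                  exact h0 k (by omega) hk2)
              rw [hrec]
              have hdd : edits.drop (i + 1 + ((edits.drop (i + 1)).takeWhile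
                  (fun s => s = "DEL")).length)
                  = (edits.drop (i + 1)).drop (((edits.drop (i + 1)).takeWhile
                    (fun s => s = "DEL")).length) := by
                rw [List.drop_drop]
              have hhead : ∀ s, (edits.drop (i + 1 + ((edits.drop (i + 1)).takeWhile
                  (fun s => s = "DEL")).length)).head? = some s → s ≠ "DEL" := by
                intro s hs
                rw [hdd] at hs
                have := pv_head_after_takeWhile (fun s => s = "DEL") (edits.drop (i + 1)) s hs
                simpa using this
              rw [pv_go_flag_indep _ _ _ false hhead]
              simp only [Nat.add_zero]
              rw [hdrop, heD, pv_go_DEL_false]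
              rw [List.drop_drop]
              rw [show ((extract_d_spans_while edits (i + 1) (seen.set i 1) false).1 : Int) - 1
                  = (i : Int) + (((edits.drop (i + 1)).takeWhile
                      (fun s => s = "DEL")).length : Int) from by
                rw [c1]; push_cast; ring]
              rw [List.append_assoc, List.singleton_append]
    · rw [extract_d_spans_loop, if_neg hi]
      rw [List.drop_eq_nil_of_le (by omega : edits.length ≤ i + s), pv_go_nil, List.append_nil]

-- B's inner while computes: n plus the length of the tok-run starting at position i + n
lemma pv_run_spec (edits : List String) (tok : String) (i : Nat) :
    ∀ n, extract_d_spans_run edits tok i n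
      = n + ((edits.drop (i + n)).takeWhile (fun s => s = tok)).length := by
  intro n
  induction n using extract_d_spans_run.induct (edits := edits) (tok := tok) (i := i) with
  | case1 n hc ih =>
    rw [extract_d_spans_run, if_pos hc, ih]
    rw [pv_drop_cons edits (i + n) hc.1, List.takeWhile_cons_of_pos (by simpa [List.getD_eq_getElem?_getD] using hc.2)]
    simp only [List.length_cons]
    have : i + (n + 1) = i + n + 1 := by omega
    rw [this]
    omega
  | case2 n hc =>
    rw [extract_d_spans_run, if_neg hc]
    by_cases hl : i + n < edits.length
    · have hne : ¬ edits.getD (i + n) "" = tok := fun he => hc ⟨hl, he⟩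
      rw [pv_drop_cons edits (i + n) hl, List.takeWhile_cons_of_neg (by simpa using hne)]
      simp
    · rw [List.drop_eq_nil_of_le (by omega)]
      simp

-- one unfolding of go on a nonempty list, with the run arithmetic normalized
lemma pv_go_cons (tok : String) (xs : List String) (i : Nat) (flag : Bool) :
    extract_d_spans_go (tok :: xs) i flag
      = (if tok = "DEL" then
          if flag then
            extract_d_spans_go (xs.drop ((xs.takeWhile (fun y => y = tok)).length))
              (i + 1 + (xs.takeWhile (fun y => y = tok)).length) flag
          else ((i : Int), (i : Int) + ((xs.takeWhile (fun y => y = tok)).length : Int)) ::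
            extract_d_spans_go (xs.drop ((xs.takeWhile (fun y => y = tok)).length))
              (i + 1 + (xs.takeWhile (fun y => y = tok)).length) flag
        else extract_d_spans_go (xs.drop ((xs.takeWhile (fun y => y = tok)).length))
          (i + 1 + (xs.takeWhile (fun y => y = tok)).length) (decide (tok ≠ "KEEP"))) := by
  rw [extract_d_spans_go]
  have h2 : 1 + (xs.takeWhile (fun y => decide (y = tok))).length - 1
      = (xs.takeWhile (fun y => decide (y = tok))).length := by omega
  have h3 : i + (1 + (xs.takeWhile (fun y => decide (y = tok))).length)
      = i + 1 + (xs.takeWhile (fun y => decide (y = tok))).length := by omega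
  rw [h2, h3]
  split_ifs <;> try rfl
  congr 2
  push_cast
  ring

-- B's outer loop against the run-consuming recursion
lemma pv_iter_spec (edits : List String) :
    ∀ (m i : Nat) (flag : Bool) (acc : List (Int × Int)),
      edits.length - i ≤ m →
      extract_d_spans_iter edits i flag acc
        = acc ++ extract_d_spans_go (edits.drop i) i flag := by
  intro m
  induction m with
  | zero =>
    intro i flag acc hm
    have hi : ¬ i < edits.length := by omega
    rw [extract_d_spans_iter, dif_neg hi]
    rw [List.drop_eq_nil_of_le (by omega), pv_go_nil, List.append_nil]
  | succ m ih =>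
    intro i flag acc hm
    by_cases hi : i < edits.length
    · rw [extract_d_spans_iter, dif_pos hi]
      have hrun := pv_run_spec edits (edits.getD i "") i 1
      have hge := pv_run_ge edits (edits.getD i "") i 1
      rw [pv_drop_cons edits i hi, pv_go_cons]
      have hdd : (edits.drop (i + 1)).drop
            (((edits.drop (i + 1)).takeWhile (fun y => y = edits.getD i "")).length)
          = edits.drop (i + extract_d_spans_run edits (edits.getD i "") i 1) := by
        rw [List.drop_drop, hrun]
        congr 1
        omega
      have hidx : i + 1 + ((edits.drop (i + 1)).takeWhile
            (fun y => y = edits.getD i "")).length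
          = i + extract_d_spans_run edits (edits.getD i "") i 1 := by omega
      by_cases hD : edits.getD i "" = "DEL"
      · rw [if_pos hD, if_pos hD]
        by_cases hf : flag = true
        · rw [if_pos hf, if_pos hf]
          rw [ih _ flag acc (by omega), hdd, hidx]
        · rw [if_neg hf, if_neg hf]
          rw [ih _ flag _ (by omega), hdd, hidx]
          rw [List.append_assoc, List.singleton_append]
          congr 3
          rw [hrun]
          push_cast
          ring
      · rw [if_neg hD, if_neg hD]
        rw [ih _ _ acc (by omega), hdd, hidx]
    · rw [extract_d_spans_iter, dif_neg hi]
      rw [List.drop_eq_nil_of_le (by omega), pv_go_nil, List.append_nil]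

theorem extract_d_spans_spec : Claim_equal_extract_d_spans := by
  intro edits _hdom
  unfold Spec_extract_d_spans extract_d_spans extract_d_spans_alt
  have h := pv_loop_spec edits edits.length 0 0 (List.replicate edits.length 0) false []
    (by omega) (by simp) (fun k hk1 hk2 => by omega)
    (fun k _ _ => by rw [pv_getD_replicate]; omega)
  have h2 := pv_iter_spec edits edits.length 0 false [] (by omega)
  simp only [Nat.add_zero, List.drop_zero, List.nil_append] at h h2
  rw [h, h2]
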